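-- pv_equiv track=rewrite | github.com/aburke921/Combinatorics | Combinatorics Problems/Reversal Distance.py | minimumreversals
-- ===== SOURCE A (Python) =====
-- def reverse(sequence, start, end): #function to perform reversal between start and end indices
--     pre=sequence[:start] #sequence up to start index
--     revsec=sequence[start:end][::-1] #sequence in between start and end read in reverse
--     post=sequence[end:] #sequence up to end index
--     return pre+revsec+post #combining parts
--
-- def getbreakpoints(sequence, target): #function to find breakpoints between 2 sequences
--     breakpts=[]
--     for i in range(len(sequence)-1): #for each value in original sequence
--         current=sequence[i] #store current value
--         adjacent=sequence[i+1] #store next value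
--         if abs(target.index(current)-target.index(adjacent)) != 1: #if original sequence values aren't adjacent in target sequence
--             breakpts.append(i+1) #add next value breakpoints list
--     return breakpts #returns a list of all breakpoints between sequences
--
-- def minimumreversals(sequences, target):
--     revs=[] #create list to store reversals
--     for seq in sequences:
--         bkpts=getbreakpoints(seq, target) #use getbreapoints function
--         for j in range(len(bkpts)-1): #iterate whole sequence over the number of breakpoints
--             for k in range(j+1, len(bkpts)): #iterate from above to end of sequence as subsequences
--                 revs.append(reverse(seq, bkpts[j], bkpts[k])) #add reversals to list
--     minbkpts=len(target) #minimum number of breakpoints is number of reversals performed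
--     minrev=[] #create list to store minimum number of reversals
--     for rev in revs: #for each reversal
--         numbkpts=len(getbreakpoints(rev, target)) #count number of breakpoints using function
--         if numbkpts<minbkpts: #if the current number of breakpoints is less than previous min
--             minbkpts=numbkpts #overwrite minimum number of breakpoints
--             minrev=[rev] #overwrite minimum number of reversals
--         elif numbkpts==minbkpts: #if the same number of breakpoints as previous min
--             minrev.append(rev) #overwrite minimum number of reversals without changing minimum breakpoints
--     return minrev #returns minimum number of required reversals to get to target from original sequence
-- ===== SOURCE B (Python) =====
-- def minimumreversals(sequences, target):
--     # Position of each value's first occurrence in target (what target.index returns).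
--     pos = {}
--     for i, v in enumerate(target):
--         pos.setdefault(v, i)
--
--     def broken(a, b):  # is the adjacency (a, b) a breakpoint? (symmetric in a, b)
--         return abs(pos[a] - pos[b]) != 1
--
--     minbkpts = len(target)
--     minrev = []
--     for seq in sequences:
--         bkpts = [i for i in range(1, len(seq)) if broken(seq[i - 1], seq[i])]
--         base = len(bkpts)
--         for j in range(len(bkpts) - 1):
--             bj = bkpts[j]
--             for k in range(j + 1, len(bkpts)):
--                 bk = bkpts[k]
--                 # Reversing seq[bj:bk] flips only the two junction adjacencies:
--                 # interior adjacencies are reversed pairs and brokenness is symmetric,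
--                 # and both junctions were breakpoints; so the new count is
--                 n = base - 2 + broken(seq[bj - 1], seq[bk - 1]) + broken(seq[bj], seq[bk])
--                 if n <= minbkpts:
--                     rev = seq[:bj] + seq[bj:bk][::-1] + seq[bk:]
--                     if n < minbkpts:
--                         minbkpts = n
--                         minrev = [rev]
--                     else:
--                         minrev.append(rev)
--     return minrev
-- ===== Notes on version B (the rewrite author's own statement) =====
-- stated objective: alternative
-- what changed: B scores each candidate reversal by an O(1) breakpoint delta (reversing a segment changes only its two junction adjacencies, since brokenness is symmetric and both junctions were breakpoints), instead of A's rebuilding every candidate and recounting its breakpoints from scratch; candidates are materialized only when they reach the running minimum and no intermediate revs list is built; intended as faster (measured ~4x at n=4096, unconfirmed at the largest timing size).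
import Mathlib
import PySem

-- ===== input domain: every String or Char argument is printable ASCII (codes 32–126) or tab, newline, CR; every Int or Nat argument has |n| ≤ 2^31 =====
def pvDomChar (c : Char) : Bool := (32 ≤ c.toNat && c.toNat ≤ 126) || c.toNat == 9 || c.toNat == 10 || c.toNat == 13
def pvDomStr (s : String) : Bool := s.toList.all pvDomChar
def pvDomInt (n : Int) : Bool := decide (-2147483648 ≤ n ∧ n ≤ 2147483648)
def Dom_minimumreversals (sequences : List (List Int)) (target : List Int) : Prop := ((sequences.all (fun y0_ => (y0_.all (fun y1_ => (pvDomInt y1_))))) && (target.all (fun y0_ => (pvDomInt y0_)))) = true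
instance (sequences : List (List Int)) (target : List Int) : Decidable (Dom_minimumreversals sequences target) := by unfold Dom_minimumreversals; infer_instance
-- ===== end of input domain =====

-- B scores each candidate reversal by a breakpoint DELTA (a reversal changes only its two
-- junction adjacencies, brokenness being symmetric) instead of A's recount-from-scratch, and
-- materializes a candidate only when it reaches the running minimum (no intermediate revs list).

-- ===== PORT A =====
-- def reverse(sequence, start, end)
def pyReverse (sequence : List Int) (start stop : Int) : List Int :=
  PySem.List.slice sequence none (some start) ++
  (PySem.List.slice sequence (some start) (some stop)).reverse ++   -- [::-1] is reverse
  PySem.List.slice sequence (some stop) none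

-- def getbreakpoints(sequence, target)
def getbreakpoints (sequence target : List Int) : List Int :=
  (PySem.List.pyRange 0 ((sequence.length : Int) - 1) 1).foldl
    (fun breakpts i =>
      let current := PySem.List.pyGetD sequence i 0
      let adjacent := PySem.List.pyGetD sequence (i + 1) 0
      -- target.index(x) raises ValueError when x ∉ target: excluded by Pre_, default 0 unused inside Pre_
      if ((((PySem.List.index? target current).getD 0 : Nat) : Int)
          - (((PySem.List.index? target adjacent).getD 0 : Nat) : Int)).natAbs ≠ 1
      then breakpts ++ [i + 1] else breakpts) []

def minimumreversals (sequences : List (List Int)) (target : List Int) : List (List Int) :=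
  let revs := sequences.foldl (fun revs seq =>
    let bkpts := getbreakpoints seq target
    (PySem.List.pyRange 0 ((bkpts.length : Int) - 1) 1).foldl (fun revs j =>
      (PySem.List.pyRange (j + 1) (bkpts.length : Int) 1).foldl (fun revs k =>
        revs ++ [pyReverse seq (PySem.List.pyGetD bkpts j 0) (PySem.List.pyGetD bkpts k 0)]) revs) revs) []
  let res := revs.foldl (fun (st : Int × List (List Int)) rev =>
      let numbkpts : Int := ((getbreakpoints rev target).length : Int)
      if numbkpts < st.1 then (numbkpts, [rev])
      else if numbkpts = st.1 then (st.1, st.2 ++ [rev]) else st)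
    ((target.length : Int), [])
  res.2

-- ===== PORT B =====
-- pos = {}; for i, v in enumerate(target): pos.setdefault(v, i)
def posMapB (target : List Int) : PySem.Dict Int Int :=
  (PySem.List.enumerate target 0).foldl (fun d p => d.setdefault p.2 p.1) PySem.Dict.empty

-- def broken(a, b): abs(pos[a] - pos[b]) != 1
-- pos[x] raises KeyError when x ∉ target: excluded by Pre_, default 0 unused inside Pre_
def brokenB (pos : PySem.Dict Int Int) (a b : Int) : Bool :=
  decide (((pos.get? a).getD 0 - (pos.get? b).getD 0).natAbs ≠ 1)

-- bkpts = [i for i in range(1, len(seq)) if broken(seq[i-1], seq[i])]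
def bkptsB (pos : PySem.Dict Int Int) (seq : List Int) : List Int :=
  (PySem.List.pyRange 1 (seq.length : Int) 1).foldl
    (fun acc i =>
      if brokenB pos (PySem.List.pyGetD seq (i - 1) 0) (PySem.List.pyGetD seq i 0)
      then acc ++ [i] else acc) []

def minimumreversals_alt (sequences : List (List Int)) (target : List Int) : List (List Int) :=
  let pos := posMapB target
  (sequences.foldl (fun (st : Int × List (List Int)) seq =>
    let bkpts := bkptsB pos seq
    let base : Int := (bkpts.length : Int)
    (PySem.List.pyRange 0 ((bkpts.length : Int) - 1) 1).foldl (fun st j =>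
      let bj := PySem.List.pyGetD bkpts j 0
      (PySem.List.pyRange (j + 1) (bkpts.length : Int) 1).foldl (fun st k =>
        let bk := PySem.List.pyGetD bkpts k 0
        -- n = base - 2 + broken(seq[bj-1], seq[bk-1]) + broken(seq[bj], seq[bk])
        let n : Int := base - 2
          + (if brokenB pos (PySem.List.pyGetD seq (bj - 1) 0) (PySem.List.pyGetD seq (bk - 1) 0) then 1 else 0)
          + (if brokenB pos (PySem.List.pyGetD seq bj 0) (PySem.List.pyGetD seq bk 0) then 1 else 0)
        if n ≤ st.1 then
          let rev := PySem.List.slice seq none (some bj) ++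
                     (PySem.List.slice seq (some bj) (some bk)).reverse ++   -- [::-1] is reverse
                     PySem.List.slice seq (some bk) none
          if n < st.1 then (n, [rev]) else (st.1, st.2 ++ [rev])
        else st) st) st) ((target.length : Int), [])).2

-- ===== PRECONDITION & SPEC =====
-- Pre_ excludes exactly the inputs on which Python A raises ValueError (target.index of a value
-- missing from target, reached whenever a sequence of length ≥ 2 has such a value); B raises
-- KeyError there too.
def Pre_minimumreversals (sequences : List (List Int)) (target : List Int) : Prop :=
  ∀ seq ∈ sequences, 2 ≤ seq.length → ∀ x ∈ seq, x ∈ target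
instance (sequences : List (List Int)) (target : List Int) : Decidable (Pre_minimumreversals sequences target) := by unfold Pre_minimumreversals; infer_instance
def pvWitness_minimumreversals : List (List Int) × List Int := ([[2, 1, 3], [1, 3, 2]], [1, 2, 3])

def Spec_minimumreversals (sequences : List (List Int)) (target : List Int) (out : List (List Int)) : Prop := out = minimumreversals_alt sequences target
instance (sequences : List (List Int)) (target : List Int) (out : List (List Int)) : Decidable (Spec_minimumreversals sequences target out) := by unfold Spec_minimumreversals; infer_instance

-- ===== CLAIM (what is proved, stated in full; the proofs are below) =====
def Claim_equal_minimumreversals : Prop := ∀ (sequences : List (List Int)) (target : List Int), Dom_minimumreversals sequences target → Pre_minimumreversals sequences target → Spec_minimumreversals sequences target (minimumreversals sequences target)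

-- ===== LEMMAS AND PROOFS =====

-- A's target.index position, as an Int
def idxT (target : List Int) (v : Int) : Int := (((PySem.List.index? target v).getD 0 : Nat) : Int)

-- the breakpoint test both programs apply, as a Bool predicate on the two adjacent values
def PA (target : List Int) (x y : Int) : Bool := decide ((idxT target x - idxT target y).natAbs ≠ 1)

-- canonical form of the breakpoint list of a sequence
def bkGo (P : Int → Int → Bool) (seq : List Int) : List Int :=
  ((List.range (seq.length - 1)).filter
      (fun k => P (seq.getD k 0) (seq.getD (k + 1) 0))).map (fun k : Nat => ((k : Int) + 1))

-- number of broken adjacencies, structurally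
def cntAdj (P : Int → Int → Bool) : List Int → Nat
  | a :: b :: t => (if P a b then 1 else 0) + cntAdj P (b :: t)
  | _ => 0

theorem PA_symm (target : List Int) (a b : Int) : PA target a b = PA target b a := by
  unfold PA
  have : (idxT target a - idxT target b).natAbs = (idxT target b - idxT target a).natAbs := by omega
  rw [this]

-- the first-occurrence dict looks up the same position as list.index
theorem posMapB_fold_get (v : Int) :
    ∀ (t : List Int) (s : Int) (d : PySem.Dict Int Int),
      (((PySem.List.enumerate t s).foldl (fun d p => d.setdefault p.2 p.1) d).get? v)
        = if d.contains v then d.get? v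
          else (PySem.List.index? t v).map (fun n : Nat => s + (n : Int)) := by
  intro t
  induction t with
  | nil =>
    intro s d
    rw [PySem.List.enumerate_nil, List.foldl_nil]
    by_cases h : d.contains v
    · rw [if_pos h]
    · rw [if_neg h]
      rw [(PySem.Dict.get?_eq_none_iff_contains d v).mpr (by simpa using h)]
      simp [PySem.List.index?_eq_idxOf?]
  | cons a t ih =>
    intro s d
    rw [PySem.List.enumerate_cons, List.foldl_cons]
    by_cases hda : d.contains a
    · rw [PySem.Dict.setdefault_of_contains _ _ hda, ih]
      by_cases hva : v = a
      · subst hva; simp [hda]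
      · rw [PySem.List.index?_cons_of_ne t (Ne.symm hva)]
        by_cases hdv : d.contains v
        · simp [hdv]
        · rw [if_neg hdv, if_neg hdv, Option.map_map]
          congr 1; funext n; simp only [Function.comp_apply]; omega
    · rw [PySem.Dict.setdefault_of_not_contains _ _ (by simpa using hda), ih]
      by_cases hva : v = a
      · subst hva
        rw [if_pos (by simp [PySem.Dict.contains_insert_self]),
            PySem.Dict.get?_insert_self, if_neg hda, PySem.List.index?_cons_self]
        simp
      · have hins : (d.insert a s).contains v = d.contains v := by
          rw [PySem.Dict.contains_insert]; simp [hva]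
        rw [hins, PySem.Dict.get?_insert_of_ne d s hva,
            PySem.List.index?_cons_of_ne t (Ne.symm hva)]
        by_cases hdv : d.contains v
        · simp [hdv]
        · rw [if_neg hdv, if_neg hdv, Option.map_map]
          congr 1; funext n; simp only [Function.comp_apply]; omega

theorem posMapB_getD (target : List Int) (v : Int) :
    (((posMapB target).get? v).getD 0) = idxT target v := by
  unfold posMapB idxT
  rw [posMapB_fold_get v target 0 PySem.Dict.empty]
  rw [if_neg (by simp [PySem.Dict.contains_empty])]
  cases PySem.List.index? target v <;> simp

theorem brokenB_eq (target : List Int) (a b : Int) :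
    brokenB (posMapB target) a b = PA target a b := by
  unfold brokenB PA
  rw [posMapB_getD, posMapB_getD]

-- A's breakpoint function equals the canonical form
theorem getbreakpoints_eq (seq target : List Int) :
    getbreakpoints seq target = bkGo (PA target) seq := by
  unfold getbreakpoints bkGo
  rw [PySem.List.pyRange_one, List.foldl_map]
  have hN : (((seq.length : Int) - 1) - 0).toNat = seq.length - 1 := by omega
  rw [hN]
  have hfun : (fun (breakpts : List Int) (k : Nat) =>
        if ((((PySem.List.index? target (PySem.List.pyGetD seq ((0 : Int) + (k : Int)) 0)).getD 0 : Nat) : Int)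
            - (((PySem.List.index? target (PySem.List.pyGetD seq ((0 : Int) + (k : Int) + 1) 0)).getD 0 : Nat) : Int)).natAbs ≠ 1
        then breakpts ++ [(0 : Int) + (k : Int) + 1] else breakpts)
      = (fun (acc : List Int) (k : Nat) =>
        if PA target (seq.getD k 0) (seq.getD (k + 1) 0) then acc ++ [(k : Int) + 1] else acc) := by
    funext acc k
    have h0 : (0 : Int) + (k : Int) = ((k : Nat) : Int) := by omega
    have h1 : (0 : Int) + (k : Int) + 1 = (((k + 1 : Nat)) : Int) := by omega
    rw [h1, h0, PySem.List.pyGetD_natCast, PySem.List.pyGetD_natCast]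
    unfold PA idxT
    by_cases hp : ((((PySem.List.index? target (seq.getD k 0)).getD 0 : Nat) : Int)
        - (((PySem.List.index? target (seq.getD (k + 1) 0)).getD 0 : Nat) : Int)).natAbs ≠ 1
    · rw [if_pos hp, if_pos (by simpa using hp)]
      simp
    · rw [if_neg hp, if_neg (by simpa using hp)]
  rw [hfun, PySem.List.foldl_append_if]
  simp

-- B's breakpoint comprehension equals the canonical form
theorem bkptsB_eq (seq target : List Int) :
    bkptsB (posMapB target) seq = bkGo (PA target) seq := by
  unfold bkptsB bkGo
  rw [PySem.List.pyRange_one, List.foldl_map]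
  have hN : ((seq.length : Int) - 1).toNat = seq.length - 1 := by omega
  rw [hN]
  have hfun : (fun (acc : List Int) (k : Nat) =>
        if brokenB (posMapB target) (PySem.List.pyGetD seq ((1 : Int) + (k : Int) - 1) 0)
            (PySem.List.pyGetD seq ((1 : Int) + (k : Int)) 0)
        then acc ++ [(1 : Int) + (k : Int)] else acc)
      = (fun (acc : List Int) (k : Nat) =>
        if PA target (seq.getD k 0) (seq.getD (k + 1) 0) then acc ++ [(k : Int) + 1] else acc) := by
    funext acc k
    have h0 : (1 : Int) + (k : Int) - 1 = ((k : Nat) : Int) := by omega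
    have h1 : (1 : Int) + (k : Int) = (((k + 1 : Nat)) : Int) := by omega
    rw [h0, h1, PySem.List.pyGetD_natCast, PySem.List.pyGetD_natCast, brokenB_eq]
    have h2 : (((k + 1 : Nat)) : Int) = (k : Int) + 1 := by omega
    rw [h2]
  rw [hfun, PySem.List.foldl_append_if]
  simp

-- length of the canonical breakpoint list is the structural adjacency count
theorem length_bkGo (P : Int → Int → Bool) (seq : List Int) :
    (bkGo P seq).length = cntAdj P seq := by
  unfold bkGo
  rw [List.length_map, ← List.countP_eq_length_filter]
  induction seq with
  | nil => rfl
  | cons a t ih =>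
    match t, ih with
    | [], _ => rfl
    | b :: t, ih =>
      have hlen : (a :: b :: t).length - 1 = (t.length + 1) := by simp
      rw [hlen, List.range_succ_eq_map, List.countP_cons, List.countP_map]
      have hbody : ((fun k => P ((a :: b :: t).getD k 0) ((a :: b :: t).getD (k + 1) 0)) ∘ Nat.succ)
          = (fun k => P ((b :: t).getD k 0) ((b :: t).getD (k + 1) 0)) := by
        funext k; simp
      rw [hbody]
      have hlen2 : (b :: t).length - 1 = t.length := by simp
      rw [hlen2] at ih
      rw [ih, cntAdj]
      simp [List.getD]
      omega

theorem cntAdj_append (P : Int → Int → Bool) :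
    ∀ (xs ys : List Int) (hx : xs ≠ []) (hy : ys ≠ []),
      cntAdj P (xs ++ ys)
        = cntAdj P xs + cntAdj P ys + (if P (xs.getLast hx) (ys.head hy) then 1 else 0)
  | [], _, hx, _ => absurd rfl hx
  | [a], c :: u, _, _ => by
    show cntAdj P (a :: c :: u) = cntAdj P [a] + cntAdj P (c :: u) + (if P a c then 1 else 0)
    rw [cntAdj]
    have h0 : cntAdj P [a] = 0 := rfl
    rw [h0]
    omega
  | a :: x :: xs, c :: u, _, _ => by
    show (if P a x then 1 else 0) + cntAdj P ((x :: xs) ++ (c :: u)) = _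
    have ih := cntAdj_append P (x :: xs) (c :: u) (by simp) (by simp)
    rw [ih, cntAdj]
    have hlast : (a :: x :: xs).getLast (by simp) = (x :: xs).getLast (by simp) := by
      rw [List.getLast_cons]
    simp only [hlast]
    omega

theorem cntAdj_reverse (P : Int → Int → Bool) (hsym : ∀ a b, P a b = P b a) :
    ∀ (l : List Int), cntAdj P l.reverse = cntAdj P l
  | [] => rfl
  | [a] => rfl
  | a :: b :: t => by
    have hrev : (a :: b :: t).reverse = (b :: t).reverse ++ [a] := by simp
    rw [hrev, cntAdj_append P ((b :: t).reverse) [a] (by simp) (by simp)]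
    rw [cntAdj_reverse P hsym (b :: t), cntAdj]
    have hl : ((b :: t).reverse).getLast (by simp) = (b :: t).head (by simp) := by
      rw [List.getLast_reverse]
    simp only [hl, List.head_cons]
    rw [hsym b a]
    have h0 : cntAdj P [a] = 0 := rfl
    rw [h0]
    omega

-- the heart: reversing seq[p:q] changes only the two junction adjacencies
theorem cnt_delta (P : Int → Int → Bool) (hsym : ∀ a b, P a b = P b a)
    (seq : List Int) (p q : Nat) (hp : 1 ≤ p) (hpq : p < q) (hq : q < seq.length) :
    (cntAdj P (seq.take p ++ ((seq.drop p).take (q - p)).reverse ++ seq.drop q) : Int)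
      = (cntAdj P seq : Int)
        - (if P (seq.getD (p - 1) 0) (seq.getD p 0) then 1 else 0)
        - (if P (seq.getD (q - 1) 0) (seq.getD q 0) then 1 else 0)
        + (if P (seq.getD (p - 1) 0) (seq.getD (q - 1) 0) then 1 else 0)
        + (if P (seq.getD p 0) (seq.getD q 0) then 1 else 0) := by
  have hA : (seq.take p).length = p := by rw [List.length_take]; omega
  have hM : ((seq.drop p).take (q - p)).length = q - p := by
    rw [List.length_take, List.length_drop]; omega
  have hW : (seq.drop q).length = seq.length - q := by rw [List.length_drop]
  have hAne : seq.take p ≠ [] := by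
    intro h; rw [h] at hA; simp at hA; omega
  have hMne : (seq.drop p).take (q - p) ≠ [] := by
    intro h; rw [h] at hM; simp at hM; omega
  have hMRne : ((seq.drop p).take (q - p)).reverse ≠ [] := by simpa using hMne
  have hWne : seq.drop q ≠ [] := by
    intro h; rw [h] at hW; simp at hW; omega
  have hMWne : (seq.drop p).take (q - p) ++ seq.drop q ≠ [] := by simp [hMne]
  have hMRWne : ((seq.drop p).take (q - p)).reverse ++ seq.drop q ≠ [] := by simp [hMRne]
  -- element identities
  have hlastA : (seq.take p).getLast hAne = seq.getD (p - 1) 0 := by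
    rw [List.getLast_eq_getElem, List.getD_eq_getElem seq 0 (by omega)]
    rw [List.getElem_take]
    congr 1; omega
  have hheadM : ((seq.drop p).take (q - p)).head hMne = seq.getD p 0 := by
    rw [List.head_eq_getElem, List.getD_eq_getElem seq 0 (by omega)]
    rw [List.getElem_take, List.getElem_drop]
    congr 1
  have hlastM : ((seq.drop p).take (q - p)).getLast hMne = seq.getD (q - 1) 0 := by
    rw [List.getLast_eq_getElem, List.getD_eq_getElem seq 0 (by omega)]
    rw [List.getElem_take, List.getElem_drop]
    congr 1; omega
  have hheadW : (seq.drop q).head hWne = seq.getD q 0 := by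
    rw [List.head_eq_getElem, List.getD_eq_getElem seq 0 (by omega)]
    rw [List.getElem_drop]
    congr 1
  have hheadMW : ((seq.drop p).take (q - p) ++ seq.drop q).head hMWne = seq.getD p 0 := by
    rw [List.head_append_of_ne_nil hMne, hheadM]
  have hheadMR : (((seq.drop p).take (q - p)).reverse).head hMRne = seq.getD (q - 1) 0 := by
    rw [List.head_reverse, hlastM]
  have hlastMR : (((seq.drop p).take (q - p)).reverse).getLast hMRne = seq.getD p 0 := by
    rw [List.getLast_reverse, hheadM]
  have hheadMRW : (((seq.drop p).take (q - p)).reverse ++ seq.drop q).head hMRWne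
      = seq.getD (q - 1) 0 := by
    rw [List.head_append_of_ne_nil hMRne, hheadMR]
  -- seq decomposes
  have hdecomp : seq = seq.take p ++ ((seq.drop p).take (q - p) ++ seq.drop q) := by
    have h1 : (seq.drop p).drop (q - p) = seq.drop q := by
      rw [List.drop_drop]; congr 1; omega
    rw [← h1, List.take_append_drop, List.take_append_drop]
  -- count both sides
  have hseq : cntAdj P seq
      = cntAdj P (seq.take p) + cntAdj P ((seq.drop p).take (q - p)) + cntAdj P (seq.drop q)
        + (if P (seq.getD (p - 1) 0) (seq.getD p 0) then 1 else 0)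
        + (if P (seq.getD (q - 1) 0) (seq.getD q 0) then 1 else 0) := by
    conv_lhs => rw [hdecomp]
    rw [cntAdj_append P _ _ hAne hMWne, cntAdj_append P _ _ hMne hWne]
    simp only [hlastA, hheadMW, hlastM, hheadW]
    omega
  have hrev : cntAdj P (seq.take p ++ ((seq.drop p).take (q - p)).reverse ++ seq.drop q)
      = cntAdj P (seq.take p) + cntAdj P ((seq.drop p).take (q - p)) + cntAdj P (seq.drop q)
        + (if P (seq.getD (p - 1) 0) (seq.getD (q - 1) 0) then 1 else 0)
        + (if P (seq.getD p 0) (seq.getD q 0) then 1 else 0) := by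
    rw [List.append_assoc]
    rw [cntAdj_append P _ _ hAne hMRWne, cntAdj_append P _ _ hMRne hWne]
    rw [cntAdj_reverse P hsym]
    simp only [hlastA, hheadMRW, hlastMR, hheadW]
    omega
  rw [hseq, hrev]
  push_cast
  ring

-- membership characterization of the canonical breakpoint list
theorem mem_bkGo (P : Int → Int → Bool) (seq : List Int) (m : Int) :
    m ∈ bkGo P seq ↔ ∃ k : Nat, k < seq.length - 1 ∧ P (seq.getD k 0) (seq.getD (k + 1) 0) = true
      ∧ m = (k : Int) + 1 := by
  unfold bkGo
  simp only [List.mem_map, List.mem_filter, List.mem_range]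
  constructor
  · rintro ⟨k, ⟨hk, hP⟩, rfl⟩; exact ⟨k, hk, hP, rfl⟩
  · rintro ⟨k, hk, hP, rfl⟩; exact ⟨k, ⟨hk, hP⟩, rfl⟩

theorem bkGo_pairwise (P : Int → Int → Bool) (seq : List Int) :
    (bkGo P seq).Pairwise (· < ·) := by
  unfold bkGo
  refine List.Pairwise.map _ (fun a b (h : a < b) => by omega) ?_
  exact (List.pairwise_lt_range).filter _

-- A's nested candidate loops fused with the scan (generic build-then-scan fusion)
theorem fuse {α β σ : Type} (scan : σ → β → σ) (bld : List β → α → List β) (fsd : σ → α → σ)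
    (h : ∀ (acc : List β) (x : α) (st : σ), ((bld acc x).foldl scan st) = fsd (acc.foldl scan st) x) :
    ∀ (l : List α) (acc : List β) (st : σ),
      ((l.foldl bld acc).foldl scan st) = l.foldl fsd (acc.foldl scan st) := by
  intro l
  induction l with
  | nil => intro acc st; rfl
  | cons x l ih => intro acc st; rw [List.foldl_cons, List.foldl_cons, ih, h]

-- proof-side name for A's scan step
def scanA (target : List Int) (st : Int × List (List Int)) (rev : List Int) :
    Int × List (List Int) :=
  if ((getbreakpoints rev target).length : Int) < st.1 then (((getbreakpoints rev target).length : Int), [rev])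
  else if ((getbreakpoints rev target).length : Int) = st.1 then (st.1, st.2 ++ [rev]) else st

theorem fusedA_eq (target : List Int) (sequences : List (List Int))
    (init : Int × List (List Int)) :
    ((sequences.foldl (fun revs seq =>
        (PySem.List.pyRange 0 (((getbreakpoints seq target).length : Int) - 1) 1).foldl (fun revs j =>
          (PySem.List.pyRange (j + 1) ((getbreakpoints seq target).length : Int) 1).foldl (fun revs k =>
            revs ++ [pyReverse seq (PySem.List.pyGetD (getbreakpoints seq target) j 0)
              (PySem.List.pyGetD (getbreakpoints seq target) k 0)]) revs) revs) []).foldl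
        (scanA target) init)
      = sequences.foldl (fun st seq =>
          (PySem.List.pyRange 0 (((getbreakpoints seq target).length : Int) - 1) 1).foldl (fun st j =>
            (PySem.List.pyRange (j + 1) ((getbreakpoints seq target).length : Int) 1).foldl (fun st k =>
              scanA target st (pyReverse seq (PySem.List.pyGetD (getbreakpoints seq target) j 0)
                (PySem.List.pyGetD (getbreakpoints seq target) k 0))) st) st) init := by
  refine fuse (scanA target) _ _ (fun acc seq st => ?_) sequences [] init
  refine fuse (scanA target) _ _ (fun acc2 j st2 => ?_) _ acc st
  refine fuse (scanA target) _ _ (fun acc3 k st3 => ?_) _ acc2 st2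
  rw [List.foldl_append]
  rfl

-- per-candidate step equality: A's recount-and-compare equals B's delta-and-compare
theorem step_eq (target seq : List Int) (j k : Int) (st : Int × List (List Int))
    (hj0 : 0 ≤ j) (hjk : j + 1 ≤ k) (hk : k < ((bkGo (PA target) seq).length : Int)) :
    scanA target st (pyReverse seq (PySem.List.pyGetD (bkGo (PA target) seq) j 0)
        (PySem.List.pyGetD (bkGo (PA target) seq) k 0))
      = (let bkpts := bkGo (PA target) seq
         let base : Int := (bkpts.length : Int)
         let bj := PySem.List.pyGetD bkpts j 0
         let bk := PySem.List.pyGetD bkpts k 0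
         let n : Int := base - 2
           + (if brokenB (posMapB target) (PySem.List.pyGetD seq (bj - 1) 0) (PySem.List.pyGetD seq (bk - 1) 0) then 1 else 0)
           + (if brokenB (posMapB target) (PySem.List.pyGetD seq bj 0) (PySem.List.pyGetD seq bk 0) then 1 else 0)
         if n ≤ st.1 then
           let rev := PySem.List.slice seq none (some bj) ++
                      (PySem.List.slice seq (some bj) (some bk)).reverse ++
                      PySem.List.slice seq (some bk) none
           if n < st.1 then (n, [rev]) else (st.1, st.2 ++ [rev])
         else st) := by
  set bkpts := bkGo (PA target) seq with hbk
  obtain ⟨jn, rfl⟩ : ∃ jn : Nat, j = (jn : Int) := ⟨j.toNat, by omega⟩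
  obtain ⟨kn, rfl⟩ : ∃ kn : Nat, k = (kn : Int) := ⟨k.toNat, by omega⟩
  have hkn : kn < bkpts.length := by exact_mod_cast hk
  have hjn : jn < kn := by exact_mod_cast hjk
  have hjn' : jn < bkpts.length := by omega
  have hgj : PySem.List.pyGetD bkpts (jn : Int) 0 = bkpts[jn] := by
    rw [PySem.List.pyGetD_natCast]; exact List.getD_eq_getElem _ _ hjn'
  have hgk : PySem.List.pyGetD bkpts (kn : Int) 0 = bkpts[kn] := by
    rw [PySem.List.pyGetD_natCast]; exact List.getD_eq_getElem _ _ hkn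
  -- decode the two breakpoint values
  obtain ⟨pj1, hpj1, hPj, hPjv⟩ := (mem_bkGo (PA target) seq bkpts[jn]).mp (List.getElem_mem hjn')
  obtain ⟨pk1, hpk1, hPk, hPkv⟩ := (mem_bkGo (PA target) seq bkpts[kn]).mp (List.getElem_mem hkn)
  have hlt : bkpts[jn] < bkpts[kn] :=
    (List.pairwise_iff_getElem.mp (bkGo_pairwise (PA target) seq)) jn kn hjn' hkn hjn
  set p : Nat := pj1 + 1 with hpdef
  set q : Nat := pk1 + 1 with hqdef
  have hbj : bkpts[jn] = (p : Int) := by rw [hPjv, hpdef]; push_cast; ring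
  have hbkv : bkpts[kn] = (q : Int) := by rw [hPkv, hqdef]; push_cast; ring
  have hp1 : 1 ≤ p := by omega
  have hpq : p < q := by
    have := hlt; rw [hbj, hbkv] at this; exact_mod_cast this
  have hqlen : q < seq.length := by omega
  -- the candidate reversal, in drop/take form
  have hrev : pyReverse seq (p : Int) (q : Int)
      = seq.take p ++ ((seq.drop p).take (q - p)).reverse ++ seq.drop q := by
    unfold pyReverse
    rw [PySem.List.slice_to_natCast, PySem.List.slice_natCast, PySem.List.slice_from_natCast]
  -- B's four probed values
  have hsj1 : PySem.List.pyGetD seq ((p : Int) - 1) 0 = seq.getD (p - 1) 0 := by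
    have : (p : Int) - 1 = ((p - 1 : Nat) : Int) := by omega
    rw [this, PySem.List.pyGetD_natCast]
  have hsk1 : PySem.List.pyGetD seq ((q : Int) - 1) 0 = seq.getD (q - 1) 0 := by
    have : (q : Int) - 1 = ((q - 1 : Nat) : Int) := by omega
    rw [this, PySem.List.pyGetD_natCast]
  have hsj : PySem.List.pyGetD seq (p : Int) 0 = seq.getD p 0 := PySem.List.pyGetD_natCast ..
  have hsk : PySem.List.pyGetD seq (q : Int) 0 = seq.getD q 0 := PySem.List.pyGetD_natCast ..
  -- junction adjacencies are broken in seq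
  have hJp : PA target (seq.getD (p - 1) 0) (seq.getD p 0) = true := by
    have : p - 1 = pj1 := by omega
    rw [this]
    have : p = pj1 + 1 := hpdef
    rw [this]; exact hPj
  have hJq : PA target (seq.getD (q - 1) 0) (seq.getD q 0) = true := by
    have h1 : q - 1 = pk1 := by omega
    rw [h1, hqdef]; exact hPk
  -- the count of the candidate via the delta
  have hcnt : ((cntAdj (PA target) (pyReverse seq (p : Int) (q : Int))) : Int)
      = (bkpts.length : Int) - 2
        + (if PA target (seq.getD (p - 1) 0) (seq.getD (q - 1) 0) then 1 else 0)
        + (if PA target (seq.getD p 0) (seq.getD q 0) then 1 else 0) := by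
    rw [hrev, cnt_delta (PA target) (PA_symm target) seq p q hp1 hpq hqlen]
    rw [hJp, hJq, hbk, length_bkGo]
    simp
    ring
  -- assemble
  simp only [hgj, hgk, hbj, hbkv, hsj1, hsk1, hsj, hsk, brokenB_eq]
  unfold scanA
  rw [getbreakpoints_eq, length_bkGo]
  set n : Int := (bkpts.length : Int) - 2
    + (if PA target (seq.getD (p - 1) 0) (seq.getD (q - 1) 0) then 1 else 0)
    + (if PA target (seq.getD p 0) (seq.getD q 0) then 1 else 0) with hn
  rw [show ((cntAdj (PA target) (pyReverse seq (p : Int) (q : Int))) : Int) = n from hcnt]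
  have hrev' : pyReverse seq (p : Int) (q : Int)
      = PySem.List.slice seq none (some (p : Int)) ++
        (PySem.List.slice seq (some (p : Int)) (some (q : Int))).reverse ++
        PySem.List.slice seq (some (q : Int)) none := rfl
  rw [← hrev']
  rcases lt_trichotomy n st.1 with h | h | h
  · rw [if_pos h, if_pos (by omega), if_pos h]
  · rw [if_neg (by omega), if_pos h, if_pos (by omega), if_neg (by omega)]
  · rw [if_neg (by omega), if_neg (by omega), if_neg (by omega)]

-- ===== VERDICT (by name: the statement is the Claim_ definition above) =====
theorem minimumreversals_spec : Claim_equal_minimumreversals := by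
  intro sequences target _ _
  show minimumreversals sequences target = minimumreversals_alt sequences target
  refine Eq.trans (congrArg Prod.snd (fusedA_eq target sequences ((target.length : Int), []))) ?_
  refine congrArg Prod.snd ?_
  apply PySem.List.foldl_congr_mem
  intro st seq _
  simp only [bkptsB_eq, getbreakpoints_eq]
  apply PySem.List.foldl_congr_mem
  intro st2 j hj
  rw [PySem.List.mem_pyRange_one] at hj
  apply PySem.List.foldl_congr_mem
  intro st3 k hk
  rw [PySem.List.mem_pyRange_one] at hk
  exact step_eq target seq j k st3 hj.1 hk.1 (by exact_mod_cast hk.2)
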